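-- pv_equiv track=rewrite | github.com/elevend0g/beta | src/rule_initialization.py | classify_ops
-- ===== SOURCE A (Python) =====
-- OP_REAL = 1
--
-- OP_IDENTITY = 2
--
-- OP_CANCEL_START = 3
--
-- OP_CANCEL_END = 4
--
-- OP_STAR_ZERO = 5
--
-- def classify_ops(expression):
--     """
--     Parse expression and classify each operation.
--
--     Args:
--         expression: str like "3+0+5-2" or "7*0+4"
--
--     Returns:
--         list of (op_char, operand, op_type) tuples
--     """
--     # Parse start value
--     i = 0
--     while i < len(expression) and expression[i].isdigit():
--         i += 1
--
--     ops = []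
--     while i < len(expression):
--         op_char = expression[i]
--         i += 1
--         operand_str = ''
--         while i < len(expression) and expression[i].isdigit():
--             operand_str += expression[i]
--             i += 1
--         operand = int(operand_str) if operand_str else 0
--         ops.append((op_char, operand))
--
--     # Classify each op
--     classified = []
--     j = 0
--     while j < len(ops):
--         op_char, operand = ops[j]
--
--         # Identity: +0, -0, *1
--         if (op_char in ('+', '-') and operand == 0) or (op_char == '*' and operand == 1):
--             classified.append((op_char, operand, OP_IDENTITY))
--             j += 1
--             continue
--
--         # Star zero: *0
--         if op_char == '*' and operand == 0:
--             classified.append((op_char, operand, OP_STAR_ZERO))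
--             j += 1
--             continue
--
--         # Check for cancellation: +N-N or -N+N
--         if j + 1 < len(ops):
--             next_op, next_val = ops[j + 1]
--             if (operand == next_val and op_char in ('+', '-') and
--                     next_op in ('+', '-') and op_char != next_op):
--                 classified.append((op_char, operand, OP_CANCEL_START))
--                 classified.append((next_op, next_val, OP_CANCEL_END))
--                 j += 2
--                 continue
--
--         # Real op
--         classified.append((op_char, operand, OP_REAL))
--         j += 1
--
--     return classified
-- ===== SOURCE B (Python) =====
-- OP_REAL = 1
-- OP_IDENTITY = 2
-- OP_CANCEL_START = 3
-- OP_CANCEL_END = 4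
-- OP_STAR_ZERO = 5
--
-- def classify_ops(expression):
--     """Tokenize with a one-fold character state machine (op char + digit string
--     under construction), then classify with a one-token pending buffer instead
--     of A's index loop with lookahead."""
--     # Phase 1: fold over the characters.
--     tokens = []
--     cur = None          # (op_char, digit_string) currently being built
--     lead = True         # still inside the leading start value
--     for ch in expression:
--         if ch.isdigit():
--             if not lead:
--                 cur = (cur[0], cur[1] + ch)
--         else:
--             lead = False
--             if cur is not None:
--                 tokens.append(cur)
--             cur = (ch, '')
--     if cur is not None:
--         tokens.append(cur)
--     # Phase 2: classify, holding at most one pending op for the cancel check.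
--     out = []
--     pend = None
--     for c, s in tokens:
--         v = int(s) if s else 0
--         if pend is not None:
--             pc, pv = pend
--             pend = None
--             if pv == v and c in ('+', '-') and pc in ('+', '-') and pc != c:
--                 out.append((pc, pv, OP_CANCEL_START))
--                 out.append((c, v, OP_CANCEL_END))
--                 continue
--             out.append((pc, pv, OP_REAL))
--         if (c in ('+', '-') and v == 0) or (c == '*' and v == 1):
--             out.append((c, v, OP_IDENTITY))
--         elif c == '*' and v == 0:
--             out.append((c, v, OP_STAR_ZERO))
--         else:
--             pend = (c, v)
--     if pend is not None:
--         out.append((pend[0], pend[1], OP_REAL))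
--     return out
-- ===== Notes on version B (the rewrite author's own statement) =====
-- stated objective: alternative
-- what changed: A tokenizes with two nested index-scanning while loops and then classifies in a second index loop with j+1 lookahead; B tokenizes with a single fold over the characters driving a (current op, digit string) state machine and classifies with a one-token pending buffer instead of lookahead.
import Mathlib
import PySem

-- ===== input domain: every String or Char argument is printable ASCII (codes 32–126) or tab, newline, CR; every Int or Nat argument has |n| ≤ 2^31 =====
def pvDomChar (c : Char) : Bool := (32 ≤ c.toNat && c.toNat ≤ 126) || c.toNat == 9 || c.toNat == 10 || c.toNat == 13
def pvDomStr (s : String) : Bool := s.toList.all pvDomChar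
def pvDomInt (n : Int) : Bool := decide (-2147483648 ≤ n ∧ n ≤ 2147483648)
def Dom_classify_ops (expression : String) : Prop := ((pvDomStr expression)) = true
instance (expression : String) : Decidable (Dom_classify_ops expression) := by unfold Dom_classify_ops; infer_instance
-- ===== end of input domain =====

-- B replaces A's two index loops (tokenize by scanning digit runs, then classify with
-- a j+1 lookahead) by a character-fold state machine building (op, digit-string)
-- tokens and a pending-buffer classifier; objective: alternative decomposition,
-- identical return value.

def OP_REAL : Int := 1
def OP_IDENTITY : Int := 2
def OP_CANCEL_START : Int := 3
def OP_CANCEL_END : Int := 4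
def OP_STAR_ZERO : Int := 5

-- shared rendering of "int(s) if s else 0" for an all-digit string s (used by both ports)
def opVal (ds : List Char) : Int := if ds.isEmpty then 0 else (PySem.Int.ofChars? ds).getD 0

-- ===== PORT A =====
-- 'while i < len(expression) and expression[i].isdigit(): i += 1' (skip the start value)
def opSkipA : List Char → List Char
  | [] => []
  | c :: rest => if PySem.Chars.isdigit c then opSkipA rest else c :: rest

-- the inner "collect operand_str" loop: (digit prefix, remaining chars)
def opTakeDigitsA : List Char → List Char × List Char
  | [] => ([], [])
  | c :: rest =>
    if PySem.Chars.isdigit c then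
      let p := opTakeDigitsA rest
      (c :: p.1, p.2)
    else ([], c :: rest)

-- (termination fact for the outer parse loop; the port cites it in decreasing_by)
theorem opTakeDigitsA_len : ∀ l : List Char, (opTakeDigitsA l).2.length ≤ l.length := by
  intro l
  induction l with
  | nil => simp [opTakeDigitsA]
  | cons c rest ih =>
    by_cases h : PySem.Chars.isdigit c
    · simpa [opTakeDigitsA, h] using Nat.le_succ_of_le ih
    · simp [opTakeDigitsA, h]

-- the outer 'while i < len(expression)' tokenizing loop; int(operand_str) if operand_str else 0
-- (operand_str is all digits, so int() cannot raise; .getD 0 is never the default here)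
def opParseA : List Char → List (String × Int)
  | [] => []
  | c :: rest =>
    let p := opTakeDigitsA rest
    (String.mk [c], opVal p.1) :: opParseA p.2
termination_by l => l.length
decreasing_by exact Nat.lt_succ_of_le (opTakeDigitsA_len rest)

-- the 'while j < len(ops)' classification loop (j+1 lookahead = match on the tail)
def opClassifyA : List (String × Int) → List (String × Int × Int)
  | [] => []
  | (c, v) :: rest =>
    if ((c = "+" ∨ c = "-") ∧ v = 0) ∨ (c = "*" ∧ v = 1) then
      (c, v, OP_IDENTITY) :: opClassifyA rest
    else if c = "*" ∧ v = 0 then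
      (c, v, OP_STAR_ZERO) :: opClassifyA rest
    else
      match rest with
      | (c2, v2) :: rest2 =>
        if v = v2 ∧ (c = "+" ∨ c = "-") ∧ (c2 = "+" ∨ c2 = "-") ∧ c ≠ c2 then
          (c, v, OP_CANCEL_START) :: (c2, v2, OP_CANCEL_END) :: opClassifyA rest2
        else
          (c, v, OP_REAL) :: opClassifyA ((c2, v2) :: rest2)
      | [] => [(c, v, OP_REAL)]

def classify_ops (expression : String) : List (String × Int × Int) :=
  opClassifyA (opParseA (opSkipA expression.toList))

-- ===== PORT B =====
-- state of B's character fold: (tokens so far, token under construction, lead flag)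
def TokSt := List (String × List Char) × Option (String × List Char) × Bool

-- the body of B's 'for ch in expression' loop
def tokStep (st : TokSt) (ch : Char) : TokSt :=
  let (toks, cur, lead) := st
  if PySem.Chars.isdigit ch then
    if lead then (toks, cur, lead)
    else
      match cur with
      | some (c, ds) => (toks, some (c, ds ++ [ch]), lead)
      | none => (toks, cur, lead)   -- unreachable: once lead is false, cur is set
  else
    ((match cur with | some t => toks ++ [t] | none => toks), some (String.mk [ch], []), false)

-- the trailing 'if cur is not None: tokens.append(cur)'
def tokFinish (st : TokSt) : List (String × List Char) :=
  match st.2.1 with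
  | some t => st.1 ++ [t]
  | none => st.1

def tokenizeB (e : String) : List (String × List Char) :=
  tokFinish (e.toList.foldl tokStep ([], none, true))

-- B's classification loop; the Option argument is the pending buffer
def clsB : Option (String × Int) → List (String × List Char) → List (String × Int × Int)
  | none, [] => []
  | some (pc, pv), [] => [(pc, pv, OP_REAL)]
  | pend, (c, ds) :: rest =>
    let v := opVal ds
    -- the if/elif/else chain classifying the current token
    let step :=
      if ((c = "+" ∨ c = "-") ∧ v = 0) ∨ (c = "*" ∧ v = 1) then
        (c, v, OP_IDENTITY) :: clsB none rest
      else if c = "*" ∧ v = 0 then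
        (c, v, OP_STAR_ZERO) :: clsB none rest
      else clsB (some (c, v)) rest
    match pend with
    | some (pc, pv) =>
      if pv = v ∧ (c = "+" ∨ c = "-") ∧ (pc = "+" ∨ pc = "-") ∧ pc ≠ c then
        (pc, pv, OP_CANCEL_START) :: (c, v, OP_CANCEL_END) :: clsB none rest
      else (pc, pv, OP_REAL) :: step
    | none => step

def classify_ops_alt (expression : String) : List (String × Int × Int) :=
  clsB none (tokenizeB expression)

-- ===== PRECONDITION & SPEC =====
def Spec_classify_ops (expression : String) (out : List (String × Int × Int)) : Prop := out = classify_ops_alt expression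
instance (expression : String) (out : List (String × Int × Int)) : Decidable (Spec_classify_ops expression out) := by unfold Spec_classify_ops; infer_instance

-- ===== CLAIM (what is proved, stated in full; the proofs are below) =====
def Claim_equal_classify_ops : Prop := ∀ (expression : String), Dom_classify_ops expression → Spec_classify_ops expression (classify_ops expression)

-- ===== LEMMAS AND PROOFS =====
-- the token stream B's fold produces, phrased over A's digit-run scanner
def parseTok : List Char → List (String × List Char)
  | [] => []
  | c :: rest =>
    let p := opTakeDigitsA rest
    (String.mk [c], p.1) :: parseTok p.2
termination_by l => l.length
decreasing_by exact Nat.lt_succ_of_le (opTakeDigitsA_len rest)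

theorem tokStep_inner (l : List Char) : ∀ (toks : List (String × List Char)) (c : String) (ds : List Char),
    tokFinish (l.foldl tokStep (toks, some (c, ds), false)) =
      toks ++ (c, ds ++ (opTakeDigitsA l).1) :: parseTok (opTakeDigitsA l).2 := by
  induction l with
  | nil => intro toks c ds; simp [tokFinish, opTakeDigitsA, parseTok]
  | cons ch rest ih =>
    intro toks c ds
    by_cases h : PySem.Chars.isdigit ch
    · simp only [List.foldl_cons, tokStep, h, if_true, Bool.false_eq_true, if_false]
      rw [ih]
      simp [opTakeDigitsA, h]
    · simp only [List.foldl_cons, tokStep, h, Bool.false_eq_true, if_false]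
      rw [ih]
      simp [opTakeDigitsA, h, parseTok]

theorem tokenizeB_eq (e : String) : tokenizeB e = parseTok (opSkipA e.toList) := by
  unfold tokenizeB
  induction e.toList with
  | nil => simp [tokFinish, parseTok, opSkipA]
  | cons ch rest ih =>
    by_cases h : PySem.Chars.isdigit ch
    · simp only [List.foldl_cons, tokStep, h, if_true, opSkipA]
      simpa [h] using ih
    · simp only [List.foldl_cons, tokStep, h, Bool.false_eq_true, if_false, opSkipA]
      rw [tokStep_inner]
      simp [parseTok]

theorem parseA_eq_map : ∀ (n : Nat) (l : List Char), l.length ≤ n →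
    opParseA l = (parseTok l).map (fun t => (t.1, opVal t.2)) := by
  intro n
  induction n with
  | zero =>
    intro l hl
    have : l = [] := List.eq_nil_of_length_eq_zero (Nat.le_zero.mp hl)
    subst this; simp [opParseA, parseTok]
  | succ n ih =>
    intro l hl
    cases l with
    | nil => simp [opParseA, parseTok]
    | cons c rest =>
      simp only [List.length_cons] at hl
      rw [opParseA, parseTok]
      simp only [List.map_cons]
      rw [ih _ (le_trans (opTakeDigitsA_len rest) (by omega))]

-- the pending-buffer classifier computes A's classification of the remaining stream,
-- with the pending op (never identity / star-zero) prepended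
theorem clsB_eq : ∀ (toks : List (String × List Char)),
    (clsB none toks = opClassifyA (toks.map (fun t => (t.1, opVal t.2)))) ∧
    (∀ pc pv, ¬ (((pc = "+" ∨ pc = "-") ∧ pv = 0) ∨ (pc = "*" ∧ pv = 1)) →
      ¬ (pc = "*" ∧ pv = 0) →
      clsB (some (pc, pv)) toks = opClassifyA ((pc, pv) :: toks.map (fun t => (t.1, opVal t.2)))) := by
  intro toks
  induction toks with
  | nil =>
    refine ⟨by simp [clsB, opClassifyA], ?_⟩
    intro pc pv hid hsz
    simp [clsB, opClassifyA, hid, hsz]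
  | cons t rest ih =>
    obtain ⟨c, ds⟩ := t
    obtain ⟨ih1, ih2⟩ := ih
    set v := opVal ds with hv
    constructor
    · show clsB none ((c, ds) :: rest) = _
      rw [clsB]
      simp only [List.map_cons]
      by_cases hid : ((c = "+" ∨ c = "-") ∧ v = 0) ∨ (c = "*" ∧ v = 1)
      · rw [opClassifyA.eq_def]
        simp only [← hv, if_pos hid]
        rw [ih1]
      · by_cases hsz : c = "*" ∧ v = 0
        · rw [opClassifyA.eq_def]
          simp only [← hv, if_neg hid, if_pos hsz]
          rw [ih1]
        · simp only [← hv, if_neg hid, if_neg hsz]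
          exact ih2 c v hid hsz
    · intro pc pv hid hsz
      show clsB (some (pc, pv)) ((c, ds) :: rest) = _
      rw [clsB]
      simp only [List.map_cons]
      rw [opClassifyA, if_neg hid, if_neg hsz]
      by_cases hc : pv = v ∧ (c = "+" ∨ c = "-") ∧ (pc = "+" ∨ pc = "-") ∧ pc ≠ c
      · have hc' : pv = v ∧ (pc = "+" ∨ pc = "-") ∧ (c = "+" ∨ c = "-") ∧ pc ≠ c := by tauto
        simp only [← hv, if_pos hc, if_pos hc']
        rw [ih1]
      · have hc' : ¬ (pv = v ∧ (pc = "+" ∨ pc = "-") ∧ (c = "+" ∨ c = "-") ∧ pc ≠ c) := by tauto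
        simp only [← hv, if_neg hc, if_neg hc']
        congr 1
        by_cases hid2 : ((c = "+" ∨ c = "-") ∧ v = 0) ∨ (c = "*" ∧ v = 1)
        · rw [opClassifyA.eq_def]
          simp only [if_pos hid2]
          rw [ih1]
        · by_cases hsz2 : c = "*" ∧ v = 0
          · rw [opClassifyA.eq_def]
            simp only [if_neg hid2, if_pos hsz2]
            rw [ih1]
          · simp only [if_neg hid2, if_neg hsz2]
            exact ih2 c v hid2 hsz2

-- ===== VERDICT (by name: the statement is the Claim_ definition above) =====
theorem classify_ops_spec : Claim_equal_classify_ops := by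
  intro e _
  unfold Spec_classify_ops classify_ops classify_ops_alt
  rw [tokenizeB_eq, (clsB_eq (parseTok (opSkipA e.toList))).1,
    parseA_eq_map (opSkipA e.toList).length (opSkipA e.toList) le_rfl]
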